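-- pv_equiv track=rewrite | github.com/ValeriiaBaranivska/Text-mining-HTW | dependency_parsing.py | _classify_reasoning_type
-- ===== SOURCE A (Python) =====
-- from typing import List, Dict, Tuple, Set
--
-- def _classify_reasoning_type(markers: List[str]) -> str:
--     """Classify the type of legal reasoning"""
--     causal_markers = {'because', 'since', 'given', 'due to', 'as a result'}
--     conclusive_markers = {'therefore', 'thus', 'consequently', 'accordingly'}
--     contrastive_markers = {'however', 'nevertheless', 'but', 'although'}
--     additive_markers = {'moreover', 'furthermore', 'additionally', 'also'}
--
--     marker_set = set(m.lower() for m in markers)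
--
--     if marker_set & causal_markers:
--         return 'causal'
--     elif marker_set & conclusive_markers:
--         return 'conclusive'
--     elif marker_set & contrastive_markers:
--         return 'contrastive'
--     elif marker_set & additive_markers:
--         return 'additive'
--     else:
--         return 'other'
-- ===== SOURCE B (Python) =====
-- from typing import List
--
-- _CATEGORIES = [
--     ('causal', ['because', 'since', 'given', 'due to', 'as a result']),
--     ('conclusive', ['therefore', 'thus', 'consequently', 'accordingly']),
--     ('contrastive', ['however', 'nevertheless', 'but', 'although']),
--     ('additive', ['moreover', 'furthermore', 'additionally', 'also']),
-- ]
-- _PRIORITY = ['causal', 'conclusive', 'contrastive', 'additive']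
--
--
-- def _classify_reasoning_type(markers: List[str]) -> str:
--     """Classify the type of legal reasoning"""
--     lookup = {}
--     for cat, words in _CATEGORIES:
--         for w in words:
--             lookup[w] = cat
--     found = set()
--     for m in markers:
--         cat = lookup.get(m.lower())
--         if cat is not None:
--             found.add(cat)
--     for cat in _PRIORITY:
--         if cat in found:
--             return cat
--     return 'other'
-- ===== Notes on version B (the rewrite author's own statement) =====
-- stated objective: idiomatic
-- what changed: Replaces four set-intersection tests with a single reverse-lookup table marker->category: one pass over the input markers records which categories occur, then the first category in the fixed priority list that occurred is returned.
import Mathlib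
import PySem

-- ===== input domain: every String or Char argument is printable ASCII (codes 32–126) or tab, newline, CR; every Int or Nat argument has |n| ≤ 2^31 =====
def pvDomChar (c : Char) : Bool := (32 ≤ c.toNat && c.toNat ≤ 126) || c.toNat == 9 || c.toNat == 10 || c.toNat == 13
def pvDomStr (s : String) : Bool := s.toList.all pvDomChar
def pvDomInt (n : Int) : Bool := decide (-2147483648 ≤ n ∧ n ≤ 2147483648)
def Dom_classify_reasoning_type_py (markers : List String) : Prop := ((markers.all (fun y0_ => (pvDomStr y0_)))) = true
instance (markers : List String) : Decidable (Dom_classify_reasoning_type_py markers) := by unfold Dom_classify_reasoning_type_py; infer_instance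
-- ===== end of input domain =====

-- B replaces A's four set-intersection tests with one reverse-lookup table marker→category,
-- a single pass over the markers collecting the categories seen, and a priority scan (idiomatic).

-- ===== PORT A =====
def pyCausal : List String := ["because", "since", "given", "due to", "as a result"]
def pyConclusive : List String := ["therefore", "thus", "consequently", "accordingly"]
def pyContrastive : List String := ["however", "nevertheless", "but", "although"]
def pyAdditive : List String := ["moreover", "furthermore", "additionally", "also"]

def classify_reasoning_type_py (markers : List String) : String :=
  let marker_set : PySem.Set String := PySem.Set.ofList (markers.map PySem.Str.lower)
  if PySem.Set.inter marker_set (PySem.Set.ofList pyCausal) ≠ [] then "causal"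
  else if PySem.Set.inter marker_set (PySem.Set.ofList pyConclusive) ≠ [] then "conclusive"
  else if PySem.Set.inter marker_set (PySem.Set.ofList pyContrastive) ≠ [] then "contrastive"
  else if PySem.Set.inter marker_set (PySem.Set.ofList pyAdditive) ≠ [] then "additive"
  else "other"

-- ===== PORT B =====
def bCategories : List (String × List String) :=
  [("causal", ["because", "since", "given", "due to", "as a result"]),
   ("conclusive", ["therefore", "thus", "consequently", "accordingly"]),
   ("contrastive", ["however", "nevertheless", "but", "although"]),
   ("additive", ["moreover", "furthermore", "additionally", "also"])]

def bPriority : List String := ["causal", "conclusive", "contrastive", "additive"]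

def classify_reasoning_type_py_alt (markers : List String) : String :=
  let lookup : PySem.Dict String String :=
    bCategories.foldl (fun d p => p.2.foldl (fun d w => d.insert w p.1) d) PySem.Dict.empty
  let found : PySem.Set String :=
    markers.foldl (fun s m =>
      match lookup.get? (PySem.Str.lower m) with
      | some c => PySem.Set.add s c
      | none => s) PySem.Set.empty
  match bPriority.find? (fun c => PySem.Set.contains found c) with
  | some c => c
  | none => "other"

-- ===== PRECONDITION & SPEC =====
def Spec_classify_reasoning_type_py (markers : List String) (out : String) : Prop := out = classify_reasoning_type_py_alt markers
instance (markers : List String) (out : String) : Decidable (Spec_classify_reasoning_type_py markers out) := by unfold Spec_classify_reasoning_type_py; infer_instance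

-- ===== CLAIM (what is proved, stated in full; the proofs are below) =====
def Claim_equal_classify_reasoning_type_py : Prop := ∀ (markers : List String), Dom_classify_reasoning_type_py markers → Spec_classify_reasoning_type_py markers (classify_reasoning_type_py markers)

-- ===== LEMMAS AND PROOFS =====

-- B's lookup table, in literal form
def lookupLit : PySem.Dict String String :=
  PySem.Dict.mk [("because", "causal"), ("since", "causal"), ("given", "causal"),
    ("due to", "causal"), ("as a result", "causal"),
    ("therefore", "conclusive"), ("thus", "conclusive"), ("consequently", "conclusive"),
    ("accordingly", "conclusive"),
    ("however", "contrastive"), ("nevertheless", "contrastive"), ("but", "contrastive"),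
    ("although", "contrastive"),
    ("moreover", "additive"), ("furthermore", "additive"), ("additionally", "additive"),
    ("also", "additive")]

lemma bLookup_eq :
    bCategories.foldl (fun d p => p.2.foldl (fun d w => d.insert w p.1) d) PySem.Dict.empty =
      lookupLit := by decide

-- emptiness of A's intersection, as a statement about the raw markers
lemma interA_empty (markers ws : List String) :
    PySem.Set.inter (PySem.Set.ofList (markers.map PySem.Str.lower)) (PySem.Set.ofList ws) = [] ↔
      ¬ ∃ m ∈ markers, PySem.Str.lower m ∈ ws := by
  rw [List.eq_nil_iff_forall_not_mem]
  constructor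
  · rintro h ⟨m, hm, hw⟩
    exact h _ ((PySem.Set.mem_inter _ _ _).2 ⟨(PySem.Set.mem_ofList _ _).2 (List.mem_map_of_mem hm),
      (PySem.Set.mem_ofList _ _).2 hw⟩)
  · intro h x hx
    obtain ⟨h1, h2⟩ := (PySem.Set.mem_inter _ _ _).1 hx
    obtain ⟨m, hm, rfl⟩ := List.mem_map.1 ((PySem.Set.mem_ofList _ _).1 h1)
    exact h ⟨m, hm, (PySem.Set.mem_ofList _ _).1 h2⟩

-- membership in B's accumulated category set
lemma mem_found (L : PySem.Dict String String) (markers : List String) (s : PySem.Set String)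
    (x : String) :
    x ∈ markers.foldl (fun s m =>
      match L.get? (PySem.Str.lower m) with
      | some c => PySem.Set.add s c
      | none => s) s ↔ x ∈ s ∨ ∃ m ∈ markers, L.get? (PySem.Str.lower m) = some x := by
  induction markers generalizing s with
  | nil => simp
  | cons m ms ih =>
    simp only [List.foldl_cons]
    cases h : L.get? (PySem.Str.lower m) with
    | none => simp [ih, h]
    | some c =>
      rw [ih]
      simp only [PySem.Set.mem_add, List.mem_cons]
      constructor
      · rintro (⟨hs | rfl⟩ | ⟨m2, hm2, hg⟩)
        · exact Or.inl hs
        · exact Or.inr ⟨m, Or.inl rfl, h⟩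
        · exact Or.inr ⟨m2, Or.inr hm2, hg⟩
      · rintro (hs | ⟨m2, (rfl | hm2), hg⟩)
        · exact Or.inl (Or.inl hs)
        · rw [h] at hg; exact Or.inl (Or.inr (Option.some_inj.1 hg).symm)
        · exact Or.inr ⟨m2, hm2, hg⟩

-- what B's lookup returns, by the four word lists
lemma lookup_spec (w : String) :
    lookupLit.get? w =
      (if w ∈ pyCausal then some "causal"
       else if w ∈ pyConclusive then some "conclusive"
       else if w ∈ pyContrastive then some "contrastive"
       else if w ∈ pyAdditive then some "additive"
       else none) := by
  by_cases h1 : w = "because"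
  · subst h1; decide
  by_cases h2 : w = "since"
  · subst h2; decide
  by_cases h3 : w = "given"
  · subst h3; decide
  by_cases h4 : w = "due to"
  · subst h4; decide
  by_cases h5 : w = "as a result"
  · subst h5; decide
  by_cases h6 : w = "therefore"
  · subst h6; decide
  by_cases h7 : w = "thus"
  · subst h7; decide
  by_cases h8 : w = "consequently"
  · subst h8; decide
  by_cases h9 : w = "accordingly"
  · subst h9; decide
  by_cases h10 : w = "however"
  · subst h10; decide
  by_cases h11 : w = "nevertheless"
  · subst h11; decide
  by_cases h12 : w = "but"
  · subst h12; decide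
  by_cases h13 : w = "although"
  · subst h13; decide
  by_cases h14 : w = "moreover"
  · subst h14; decide
  by_cases h15 : w = "furthermore"
  · subst h15; decide
  by_cases h16 : w = "additionally"
  · subst h16; decide
  by_cases h17 : w = "also"
  · subst h17; decide
  simp [lookupLit, PySem.Dict.get?, pyCausal, pyConclusive, pyContrastive, pyAdditive,
    h1, h2, h3, h4, h5, h6, h7, h8, h9, h10, h11, h12, h13, h14, h15, h16, h17, Ne.symm h1, Ne.symm h2, Ne.symm h3, Ne.symm h4, Ne.symm h5, Ne.symm h6, Ne.symm h7, Ne.symm h8, Ne.symm h9, Ne.symm h10, Ne.symm h11, Ne.symm h12, Ne.symm h13, Ne.symm h14, Ne.symm h15, Ne.symm h16, Ne.symm h17]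

lemma get_causal (w : String) : lookupLit.get? w = some "causal" ↔ w ∈ pyCausal := by
  rw [lookup_spec]
  split_ifs with h1 h2 h3 h4 <;>
    first
      | (fin_cases h1 <;> decide)
      | (fin_cases h2 <;> decide)
      | (fin_cases h3 <;> decide)
      | (fin_cases h4 <;> decide)
      | simp [*]

lemma get_conclusive (w : String) : lookupLit.get? w = some "conclusive" ↔ w ∈ pyConclusive := by
  rw [lookup_spec]
  split_ifs with h1 h2 h3 h4 <;>
    first
      | (fin_cases h1 <;> decide)
      | (fin_cases h2 <;> decide)
      | (fin_cases h3 <;> decide)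
      | (fin_cases h4 <;> decide)
      | simp [*]

lemma get_contrastive (w : String) : lookupLit.get? w = some "contrastive" ↔ w ∈ pyContrastive := by
  rw [lookup_spec]
  split_ifs with h1 h2 h3 h4 <;>
    first
      | (fin_cases h1 <;> decide)
      | (fin_cases h2 <;> decide)
      | (fin_cases h3 <;> decide)
      | (fin_cases h4 <;> decide)
      | simp [*]

lemma get_additive (w : String) : lookupLit.get? w = some "additive" ↔ w ∈ pyAdditive := by
  rw [lookup_spec]
  split_ifs with h1 h2 h3 h4 <;>
    first
      | (fin_cases h1 <;> decide)
      | (fin_cases h2 <;> decide)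
      | (fin_cases h3 <;> decide)
      | (fin_cases h4 <;> decide)
      | simp [*]

lemma classify_eq (markers : List String) :
    classify_reasoning_type_py markers = classify_reasoning_type_py_alt markers := by
  simp only [classify_reasoning_type_py, classify_reasoning_type_py_alt, bLookup_eq, bPriority,
    List.find?]
  have memf : ∀ x, x ∈ markers.foldl (fun s m =>
      match lookupLit.get? (PySem.Str.lower m) with
      | some c => PySem.Set.add s c
      | none => s) PySem.Set.empty ↔
      ∃ m ∈ markers, lookupLit.get? (PySem.Str.lower m) = some x := by
    intro x; rw [mem_found]; simp [PySem.Set.empty]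
  have hC := (PySem.Set.contains_iff _ "causal").trans ((memf "causal").trans
    (exists_congr fun m => and_congr_right fun _ => get_causal (PySem.Str.lower m)))
  have bC : PySem.Set.contains (markers.foldl (fun s m =>
      match lookupLit.get? (PySem.Str.lower m) with
      | some c => PySem.Set.add s c
      | none => s) PySem.Set.empty) "causal" =
      decide (∃ m ∈ markers, PySem.Str.lower m ∈ pyCausal) := by
    rw [Bool.eq_iff_iff, decide_eq_true_eq]; exact hC
  have hL := (PySem.Set.contains_iff _ "conclusive").trans ((memf "conclusive").trans
    (exists_congr fun m => and_congr_right fun _ => get_conclusive (PySem.Str.lower m)))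
  have bL : PySem.Set.contains (markers.foldl (fun s m =>
      match lookupLit.get? (PySem.Str.lower m) with
      | some c => PySem.Set.add s c
      | none => s) PySem.Set.empty) "conclusive" =
      decide (∃ m ∈ markers, PySem.Str.lower m ∈ pyConclusive) := by
    rw [Bool.eq_iff_iff, decide_eq_true_eq]; exact hL
  have hT := (PySem.Set.contains_iff _ "contrastive").trans ((memf "contrastive").trans
    (exists_congr fun m => and_congr_right fun _ => get_contrastive (PySem.Str.lower m)))
  have bT : PySem.Set.contains (markers.foldl (fun s m =>
      match lookupLit.get? (PySem.Str.lower m) with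
      | some c => PySem.Set.add s c
      | none => s) PySem.Set.empty) "contrastive" =
      decide (∃ m ∈ markers, PySem.Str.lower m ∈ pyContrastive) := by
    rw [Bool.eq_iff_iff, decide_eq_true_eq]; exact hT
  have hD := (PySem.Set.contains_iff _ "additive").trans ((memf "additive").trans
    (exists_congr fun m => and_congr_right fun _ => get_additive (PySem.Str.lower m)))
  have bD : PySem.Set.contains (markers.foldl (fun s m =>
      match lookupLit.get? (PySem.Str.lower m) with
      | some c => PySem.Set.add s c
      | none => s) PySem.Set.empty) "additive" =
      decide (∃ m ∈ markers, PySem.Str.lower m ∈ pyAdditive) := by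
    rw [Bool.eq_iff_iff, decide_eq_true_eq]; exact hD
  rw [bC, bL, bT, bD]
  clear hC hL hT hD bC bL bT bD memf
  have aC := interA_empty markers pyCausal
  have aL := interA_empty markers pyConclusive
  have aT := interA_empty markers pyContrastive
  have aD := interA_empty markers pyAdditive
  by_cases eC : ∃ m ∈ markers, PySem.Str.lower m ∈ pyCausal <;>
    by_cases eL : ∃ m ∈ markers, PySem.Str.lower m ∈ pyConclusive <;>
      by_cases eT : ∃ m ∈ markers, PySem.Str.lower m ∈ pyContrastive <;>
        by_cases eD : ∃ m ∈ markers, PySem.Str.lower m ∈ pyAdditive <;>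
          simp only [eC, eL, eT, eD, decide_true, decide_false] <;> simp_all

-- ===== VERDICT (by name: the statement is the Claim_ definition above) =====
theorem classify_reasoning_type_py_spec : Claim_equal_classify_reasoning_type_py := by
  intro markers _
  unfold Spec_classify_reasoning_type_py
  exact classify_eq markers
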